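-- pv_equiv track=rewrite | github.com/pypi-data/pypi-mirror-338 | packages/kcpp/kcpp-0.4.1-py3-none-any.whl/kcpp/basic/types.py | sparse_line_offsets
-- ===== SOURCE A (Python) =====
-- def line_offsets_gen(raw):
--     for n, c in enumerate(raw):
--         if c == 10:  # '\n'
--             yield n + 1
--         elif c == 13:  # '\r'
--             if n + 1 == len(raw) or raw[n + 1] != 10:
--                 yield n + 1
--
-- def sparse_line_offsets(raw, min_step):
--     '''Return a sparse sorted list of (line_offset, line_number) pairs.  The list always
--     starts with (0,1).
--     '''
--     result = [(0, 1)]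
--
--     beyond = min_step
--     line_number = 1
--     for line_number, offset in enumerate(line_offsets_gen(raw), start=2):
--         if offset >= beyond:
--             result.append((offset, line_number))
--             beyond = offset + min_step
--
--     return result
-- ===== SOURCE B (Python) =====
-- def sparse_line_offsets(raw, min_step):
--     '''Return a sparse sorted list of (line_offset, line_number) pairs.  The list always
--     starts with (0,1).
--     '''
--     n = len(raw)
--     # Two independent comprehensions: ends of '\n'-terminated breaks, and ends of
--     # lone-'\r' breaks (a '\r' directly followed by '\n' belongs to the CRLF break,
--     # whose end is already the position after that '\n').
--     lf_ends = [i + 1 for i, c in enumerate(raw) if c == 10]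
--     cr_ends = [i + 1 for i, c in enumerate(raw)
--                if c == 13 and (i + 1 == n or raw[i + 1] != 10)]
--     # Merge by sorting; the position in the merged list determines the line number.
--     offsets = sorted(lf_ends + cr_ends)
--     result = [(0, 1)]
--     beyond = min_step
--     for k, offset in enumerate(offsets):
--         if offset >= beyond:
--             result.append((offset, k + 2))
--             beyond = offset + min_step
--     return result
-- ===== Notes on version B (the rewrite author's own statement) =====
-- stated objective: alternative
-- what changed: Replaces A's stateful generator scan by a split-and-merge design: two independent comprehensions collect '\n'-break ends and lone-'\r'-break ends, sorted() merges them, and line numbers are derived from positions in the merged list instead of being threaded through the scan.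
import Mathlib
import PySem

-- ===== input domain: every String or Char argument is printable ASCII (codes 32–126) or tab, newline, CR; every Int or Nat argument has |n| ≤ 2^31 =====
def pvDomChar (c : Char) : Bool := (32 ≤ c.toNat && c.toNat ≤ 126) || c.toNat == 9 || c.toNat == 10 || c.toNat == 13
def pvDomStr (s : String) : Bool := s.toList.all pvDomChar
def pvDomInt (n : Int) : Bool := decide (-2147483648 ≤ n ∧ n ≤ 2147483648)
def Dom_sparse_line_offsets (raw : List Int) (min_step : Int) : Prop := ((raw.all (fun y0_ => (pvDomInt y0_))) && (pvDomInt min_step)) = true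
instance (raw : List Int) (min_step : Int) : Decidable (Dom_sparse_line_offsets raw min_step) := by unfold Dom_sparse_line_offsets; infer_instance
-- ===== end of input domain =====

-- B replaces A's stateful generator scan by a split-and-merge design: two independent
-- comprehensions (LF-break ends, lone-CR-break ends) merged by sorting, line numbers
-- derived from the position in the merged list; alternative, not claimed faster.

-- ===== PORT A =====
-- generator line_offsets_gen, fully consumed by the caller: ported as the list it yields
def line_offsets_gen (raw : List Int) : List Int :=
  (PySem.List.enumerate raw 0).foldl (fun acc nc =>
    if nc.2 == 10 then acc ++ [nc.1 + 1]
    else if nc.2 == 13 then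
      -- Python's short-circuit `n + 1 == len(raw) or raw[n+1] != 10`; the index is
      -- only out of range when the first disjunct holds, so getD 0 is never observed
      if nc.1 + 1 == (raw.length : Int) || (PySem.List.pyGet? raw (nc.1 + 1)).getD 0 != 10
      then acc ++ [nc.1 + 1] else acc
    else acc) []

def sparse_line_offsets (raw : List Int) (min_step : Int) : List (Int × Int) :=
  ((PySem.List.enumerate (line_offsets_gen raw) 2).foldl
    (fun (st : List (Int × Int) × Int) lo =>
      if lo.2 ≥ st.2 then (st.1 ++ [(lo.2, lo.1)], lo.2 + min_step) else st)
    ([(0, 1)], min_step)).1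

-- ===== PORT B =====
def sparse_line_offsets_alt (raw : List Int) (min_step : Int) : List (Int × Int) :=
  let n : Int := raw.length
  -- [i + 1 for i, c in enumerate(raw) if c == 10]
  let lf_ends := ((PySem.List.enumerate raw 0).filter (fun ic => ic.2 == 10)).map (fun ic => ic.1 + 1)
  -- [i + 1 for i, c in enumerate(raw) if c == 13 and (i + 1 == n or raw[i+1] != 10)]
  let cr_ends := ((PySem.List.enumerate raw 0).filter (fun ic =>
      ic.2 == 13 && (ic.1 + 1 == n || (PySem.List.pyGet? raw (ic.1 + 1)).getD 0 != 10))).map (fun ic => ic.1 + 1)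
  let offsets := PySem.List.sorted (lf_ends ++ cr_ends) (fun x => x) false
  ((PySem.List.enumerate offsets 0).foldl
    (fun (st : List (Int × Int) × Int) ko =>
      if ko.2 ≥ st.2 then (st.1 ++ [(ko.2, ko.1 + 2)], ko.2 + min_step) else st)
    ([(0, 1)], min_step)).1

-- ===== PRECONDITION & SPEC =====
def Spec_sparse_line_offsets (raw : List Int) (min_step : Int) (out : List (Int × Int)) : Prop := out = sparse_line_offsets_alt raw min_step
instance (raw : List Int) (min_step : Int) (out : List (Int × Int)) : Decidable (Spec_sparse_line_offsets raw min_step out) := by unfold Spec_sparse_line_offsets; infer_instance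

-- ===== CLAIM (what is proved, stated in full; the proofs are below) =====
def Claim_equal_sparse_line_offsets : Prop := ∀ (raw : List Int) (min_step : Int), Dom_sparse_line_offsets raw min_step → Spec_sparse_line_offsets raw min_step (sparse_line_offsets raw min_step)

-- ===== LEMMAS AND PROOFS =====

-- the combined break test of A's generator, as one boolean on an (index, byte) pair
def breakCond (raw : List Int) (ic : Int × Int) : Bool :=
  ic.2 == 10 || (ic.2 == 13 && (ic.1 + 1 == (raw.length : Int) || (PySem.List.pyGet? raw (ic.1 + 1)).getD 0 != 10))

-- A's generator yields exactly the break-end positions, in index order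
theorem gen_eq_filter (raw : List Int) :
    line_offsets_gen raw =
      ((PySem.List.enumerate raw 0).filter (breakCond raw)).map (fun ic => ic.1 + 1) := by
  unfold line_offsets_gen
  have hf : (fun (acc : List Int) (nc : Int × Int) =>
      if nc.2 == 10 then acc ++ [nc.1 + 1]
      else if nc.2 == 13 then
        if nc.1 + 1 == (raw.length : Int) || (PySem.List.pyGet? raw (nc.1 + 1)).getD 0 != 10
        then acc ++ [nc.1 + 1] else acc
      else acc)
      = (fun (acc : List Int) (nc : Int × Int) =>
          if breakCond raw nc then acc ++ [nc.1 + 1] else acc) := by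
    funext acc nc
    by_cases h10 : nc.2 = 10
    · simp [breakCond, h10]
    · by_cases h13 : nc.2 = 13
      · by_cases hc : (nc.1 + 1 == (raw.length : Int) || (PySem.List.pyGet? raw (nc.1 + 1)).getD 0 != 10) = true
        · simp [breakCond, h13, hc]
        · simp [breakCond, h13, hc]
      · simp [breakCond, h10, h13]
  rw [hf, PySem.List.foldl_append_if]
  simp

-- disjoint filters split: filter (p or q) is a permutation of filter p ++ filter q
theorem filter_or_perm {α : Type} (p q : α → Bool) (l : List α)
    (hdisj : ∀ x, p x = true → q x = false) :
    (l.filter p ++ l.filter q).Perm (l.filter (fun x => p x || q x)) := by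
  induction l with
  | nil => simp
  | cons x l ih =>
    by_cases hp : p x = true
    · simp [hp, hdisj x hp]
      exact ih
    · by_cases hq : q x = true
      · simp only [Bool.not_eq_true] at hp
        simp [hp, hq]
        exact (List.perm_middle).trans (ih.cons x)
      · simp only [Bool.not_eq_true] at hp hq
        simpa [List.filter_cons, hp, hq] using ih

-- the break-end list is strictly increasing
theorem gen_pairwise (raw : List Int) :
    (((PySem.List.enumerate raw 0).filter (breakCond raw)).map (fun ic => ic.1 + 1)).Pairwise (· < ·) := by
  have h1 : ((PySem.List.enumerate raw 0).filter (breakCond raw)).Pairwise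
      (fun p q => p.1 < q.1) :=
    (PySem.List.pairwise_lt_enumerate raw 0).filter _
  rw [List.pairwise_map]
  exact h1.imp (fun h => by omega)

-- the two sparse-filter folds agree: A carries the line number in the enumerate start,
-- B adds 2 to the index.
theorem filter_eq (min_step : Int) : ∀ (xs : List Int) (s : Int) (st : List (Int × Int) × Int),
    (PySem.List.enumerate xs (s + 2)).foldl
      (fun (st : List (Int × Int) × Int) lo =>
        if lo.2 ≥ st.2 then (st.1 ++ [(lo.2, lo.1)], lo.2 + min_step) else st) st =
    (PySem.List.enumerate xs s).foldl
      (fun (st : List (Int × Int) × Int) jo =>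
        if jo.2 ≥ st.2 then (st.1 ++ [(jo.2, jo.1 + 2)], jo.2 + min_step) else st) st := by
  intro xs
  induction xs with
  | nil => intro s st; simp [PySem.List.enumerate_nil]
  | cons x xs ih =>
    intro s st
    simp only [PySem.List.enumerate_cons, List.foldl_cons]
    have h : s + 2 + 1 = s + 1 + 2 := by ring
    rw [h, ih]

-- B's sorted merge of the two comprehensions is exactly A's generator output
theorem sorted_merge_eq (raw : List Int) :
    PySem.List.sorted
      (((PySem.List.enumerate raw 0).filter (fun ic => ic.2 == 10)).map (fun ic => ic.1 + 1) ++
       ((PySem.List.enumerate raw 0).filter (fun ic =>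
          ic.2 == 13 && (ic.1 + 1 == (raw.length : Int) || (PySem.List.pyGet? raw (ic.1 + 1)).getD 0 != 10))).map (fun ic => ic.1 + 1))
      (fun x => x) false
      = line_offsets_gen raw := by
  rw [gen_eq_filter]
  apply PySem.List.sorted_eq_of_perm_of_pairwise_lt
  · have hperm := filter_or_perm (fun ic : Int × Int => ic.2 == 10)
      (fun ic : Int × Int => ic.2 == 13 && (ic.1 + 1 == (raw.length : Int) || (PySem.List.pyGet? raw (ic.1 + 1)).getD 0 != 10))
      (PySem.List.enumerate raw 0)
      (by intro x hx; simp at hx ⊢; intro h13; omega)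
    have := (hperm.map (fun ic : Int × Int => ic.1 + 1)).symm
    simpa [breakCond] using this
  · exact gen_pairwise raw

-- ===== VERDICT (by name: the statement is the Claim_ definition above) =====
theorem sparse_line_offsets_spec : Claim_equal_sparse_line_offsets := by
  intro raw min_step _
  unfold Spec_sparse_line_offsets
  simp only [sparse_line_offsets, sparse_line_offsets_alt, sorted_merge_eq]
  have h := filter_eq min_step (line_offsets_gen raw) 0 ([(0, 1)], min_step)
  rw [show ((0:Int) + 2) = 2 from rfl] at h
  exact congrArg Prod.fst h
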